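-- pv_equiv track=rewrite | github.com/Rubal0990/GFG-DSA | Frogs and Jumps - GFG/frogs-and-jumps.py | unvisitedLeaves
-- ===== SOURCE A (Python) =====
-- def unvisitedLeaves(N, leaves, frogs):
--     leavesArr = [0] * leaves
--     frogs = sorted(list(set(frogs)))
--
--     for i in frogs:
--         mul = 1
--         while i <= leaves and mul * i <= leaves:
--             curr = mul * i - 1
--             if leavesArr[curr] == 0:
--                 leavesArr[curr] = 1
--
--             mul += 1
--
--     ans = 0
--     for i in leavesArr:
--         if i == 0:
--             ans += 1
--
--     return ans
-- ===== SOURCE B (Python) =====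
-- def unvisitedLeaves(N, leaves, frogs):
--     # Count leaves directly: a leaf p stays unvisited iff no frog jump divides p.
--     return sum(1 for p in range(1, leaves + 1) if all(p % f for f in frogs))
-- ===== Notes on version B (the rewrite author's own statement) =====
-- stated objective: simpler
-- what changed: Replaces A's sieve (allocate a marking array, mark every multiple of each dedup-sorted frog, then count unmarked slots) with a direct one-line per-leaf divisibility count over range(1, leaves+1), with no array and no dedup/sort.
import Mathlib
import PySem

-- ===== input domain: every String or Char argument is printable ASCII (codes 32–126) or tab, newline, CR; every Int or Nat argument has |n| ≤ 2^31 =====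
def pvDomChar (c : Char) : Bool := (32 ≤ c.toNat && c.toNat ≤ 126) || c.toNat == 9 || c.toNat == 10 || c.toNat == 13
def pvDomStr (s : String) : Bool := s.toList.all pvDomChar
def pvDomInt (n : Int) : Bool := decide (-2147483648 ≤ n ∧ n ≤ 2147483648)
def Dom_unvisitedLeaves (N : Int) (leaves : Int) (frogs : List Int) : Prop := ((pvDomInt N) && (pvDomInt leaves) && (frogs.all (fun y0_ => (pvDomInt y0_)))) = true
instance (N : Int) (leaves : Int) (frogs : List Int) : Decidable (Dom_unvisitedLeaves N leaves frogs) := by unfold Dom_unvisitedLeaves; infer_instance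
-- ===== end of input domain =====

-- B drops A's marking array and sieve and instead counts, per leaf p in 1..leaves, those p no frog divides (simpler, not faster).

-- ===== PORT A =====
-- A's inner 'while i <= leaves and mul * i <= leaves' loop, with enough fuel for every admitted input
def pvMark (leaves : Int) (i : Int) : Nat → Int → List Int → List Int
  | 0, _, arr => arr
  | fuel + 1, mul, arr =>
    if i ≤ leaves ∧ mul * i ≤ leaves then
      let curr := mul * i - 1
      let arr' := if PySem.List.pyGetD arr curr 0 = 0 then PySem.List.pySetD arr curr 1 else arr
      pvMark leaves i fuel (mul + 1) arr'
    else arr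

def unvisitedLeaves (N : Int) (leaves : Int) (frogs : List Int) : Int :=
  let leavesArr := List.replicate leaves.toNat (0 : Int)
  let fs := PySem.List.sorted (PySem.Set.ofList frogs) (fun x => x) false
  let arr := fs.foldl (fun arr i => pvMark leaves i (leaves.toNat + 1) 1 arr) leavesArr
  arr.foldl (fun ans i => if i = 0 then ans + 1 else ans) 0

-- ===== PORT B =====
def unvisitedLeaves_alt (N : Int) (leaves : Int) (frogs : List Int) : Int :=
  (((PySem.List.pyRange 1 (leaves + 1) 1).filter
      (fun p => frogs.all (fun f => decide (PySem.Int.mod p f ≠ 0)))).length : Int)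

-- ===== PRECONDITION & SPEC =====
-- Pre_ excludes exactly the inputs on which A raises IndexError or loops forever (a frog ≤ 0 when
-- leaves ≥ 0, or a frog ≤ leaves when leaves < 0); A returns normally on every admitted input.
def Pre_unvisitedLeaves (N : Int) (leaves : Int) (frogs : List Int) : Prop :=
  if 0 ≤ leaves then ∀ f ∈ frogs, 0 < f else ∀ f ∈ frogs, leaves < f
instance (N : Int) (leaves : Int) (frogs : List Int) : Decidable (Pre_unvisitedLeaves N leaves frogs) := by unfold Pre_unvisitedLeaves; infer_instance
def pvWitness_unvisitedLeaves : Int × Int × List Int := (1, 10, [2, 3])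

def Spec_unvisitedLeaves (N : Int) (leaves : Int) (frogs : List Int) (out : Int) : Prop := out = unvisitedLeaves_alt N leaves frogs
instance (N : Int) (leaves : Int) (frogs : List Int) (out : Int) : Decidable (Spec_unvisitedLeaves N leaves frogs out) := by unfold Spec_unvisitedLeaves; infer_instance

-- ===== CLAIM (what is proved, stated in full; the proofs are below) =====
def Claim_equal_unvisitedLeaves : Prop := ∀ (N : Int) (leaves : Int) (frogs : List Int), Dom_unvisitedLeaves N leaves frogs → Pre_unvisitedLeaves N leaves frogs → Spec_unvisitedLeaves N leaves frogs (unvisitedLeaves N leaves frogs)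

-- ===== LEMMAS AND PROOFS =====

theorem pvMark_length (leaves i : Int) (fuel : Nat) (mul : Int) (arr : List Int) :
    (pvMark leaves i fuel mul arr).length = arr.length := by
  induction fuel generalizing mul arr with
  | zero => rfl
  | succ n ih =>
    simp only [pvMark]
    split
    · rw [ih]
      split <;> simp [PySem.List.length_pySetD]
    · rfl

-- after the inner while loop, slot j holds 1 exactly where a multiple m*i (m ≥ mul) equals j+1
theorem pvMark_get (leaves i : Int) (hi : 1 ≤ i) (fuel : Nat) (mul : Int) (hmul : 1 ≤ mul)
    (hfuel : leaves < (mul + fuel) * i) (arr : List Int) (hlen : (arr.length : Int) = leaves)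
    (j : Nat) (hj : j < arr.length) :
    (pvMark leaves i fuel mul arr).getD j 0 =
      if (i ∣ ((j : Int) + 1) ∧ mul * i ≤ (j : Int) + 1) ∧ arr.getD j 0 = 0 then 1
      else arr.getD j 0 := by
  induction fuel generalizing mul arr with
  | zero =>
    have hne : ¬ ((i ∣ ((j : Int) + 1) ∧ mul * i ≤ (j : Int) + 1) ∧ arr.getD j 0 = 0) := by
      rintro ⟨⟨_, hle⟩, _⟩
      simp only [Nat.cast_zero, add_zero] at hfuel
      omega
    rw [if_neg hne]; rfl
  | succ n ih =>
    simp only [pvMark]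
    split
    · next hcond =>
      obtain ⟨hil, hmil⟩ := hcond
      have hcurr0 : 0 ≤ mul * i - 1 := by nlinarith
      have hcurrlt : mul * i - 1 < (arr.length : Int) := by omega
      set curr := mul * i - 1 with hc
      set arr' := if PySem.List.pyGetD arr curr 0 = 0 then PySem.List.pySetD arr curr 1 else arr with ha'
      have hget : PySem.List.pyGetD arr curr 0 = arr.getD curr.toNat 0 := by
        rw [PySem.List.pyGetD_eq_getElem arr 0 hcurr0 (by omega)]
        rw [List.getD_eq_getElem _ _ (by omega)]
      have hlen' : arr'.length = arr.length := by
        rw [ha']; split <;> simp [PySem.List.length_pySetD]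
      have harrj : arr'.getD j 0 = if curr.toNat = j ∧ arr.getD j 0 = 0 then 1 else arr.getD j 0 := by
        rw [ha', hget]
        split
        · next h0 =>
          rw [PySem.List.pySetD_of_nonneg arr 1 hcurr0]
          by_cases hcj : curr.toNat = j
          · rw [if_pos ⟨hcj, hcj ▸ h0⟩]
            simp [List.getD_eq_getElem?_getD, hcj, hj]
          · rw [if_neg (by rintro ⟨h, _⟩; exact hcj h)]
            simp [List.getD_eq_getElem?_getD, hcj]
        · next h0 =>
          rw [if_neg (by rintro ⟨hcj, h⟩; exact h0 (hcj ▸ h))]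
      rw [ih (mul + 1) (by omega) (by push_cast at hfuel ⊢; nlinarith [hfuel]) arr'
            (by rw [hlen']; exact hlen) (by rw [hlen']; exact hj)]
      by_cases hjc : (j : Int) + 1 = mul * i
      · have hcj : curr.toNat = j := by omega
        have hLf : ¬ (((i ∣ ((j : Int) + 1) ∧ (mul + 1) * i ≤ (j : Int) + 1)) ∧ arr'.getD j 0 = 0) := by
          rintro ⟨⟨_, h⟩, _⟩; nlinarith
        have hdvd : i ∣ ((j : Int) + 1) := ⟨mul, by rw [hjc, mul_comm]⟩
        by_cases h0 : arr.getD j 0 = 0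
        · rw [if_neg hLf, harrj, if_pos ⟨hcj, h0⟩, if_pos ⟨⟨hdvd, by omega⟩, h0⟩]
        · rw [if_neg hLf, harrj, if_neg (by rintro ⟨_, h⟩; exact h0 h),
              if_neg (by rintro ⟨_, h⟩; exact h0 h)]
      · have hcj : ¬ curr.toNat = j := by omega
        have harrj' : arr'.getD j 0 = arr.getD j 0 := by
          rw [harrj, if_neg (by rintro ⟨h, _⟩; exact hcj h)]
        rw [harrj']
        have key : ((i ∣ ((j : Int) + 1) ∧ (mul + 1) * i ≤ (j : Int) + 1) ∧ arr.getD j 0 = 0) ↔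
            ((i ∣ ((j : Int) + 1) ∧ mul * i ≤ (j : Int) + 1) ∧ arr.getD j 0 = 0) := by
          constructor
          · rintro ⟨⟨hd, hle⟩, h0⟩; exact ⟨⟨hd, by nlinarith⟩, h0⟩
          · rintro ⟨⟨hd, hle⟩, h0⟩
            obtain ⟨c, hcst⟩ := hd
            have h1 : mul ≤ c := by
              by_contra hc'
              have h2 : c ≤ mul - 1 := by omega
              nlinarith [mul_le_mul_of_nonneg_left h2 (show (0:Int) ≤ i by omega)]
            have h2 : mul ≠ c := by
              rintro rfl; exact hjc (by rw [hcst, mul_comm])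
            refine ⟨⟨⟨c, hcst⟩, ?_⟩, h0⟩
            nlinarith [mul_le_mul_of_nonneg_left (show mul + 1 ≤ c by omega)
              (show (0:Int) ≤ i by omega)]
        rw [if_congr key rfl rfl]
    · next hcond =>
      have hne : ¬ ((i ∣ ((j : Int) + 1) ∧ mul * i ≤ (j : Int) + 1) ∧ arr.getD j 0 = 0) := by
        rintro ⟨⟨hdvd, hle⟩, _⟩
        have h2 : i ≤ (j : Int) + 1 := Int.le_of_dvd (by omega) hdvd
        have ha : i ≤ leaves := by omega
        have hb : mul * i ≤ leaves := by omega
        exact hcond ⟨ha, hb⟩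
      rw [if_neg hne]

theorem pvMark_fold_length (leaves : Int) (F : Nat) (fs : List Int) (arr : List Int) :
    (fs.foldl (fun a i => pvMark leaves i F 1 a) arr).length = arr.length := by
  induction fs generalizing arr with
  | nil => rfl
  | cons i fs ih => simp only [List.foldl_cons]; rw [ih, pvMark_length]

-- after A's whole sieve, slot j holds 1 exactly when some frog divides j+1
theorem pvMark_fold_get (leaves : Int) (hge : 0 ≤ leaves) (fs : List Int)
    (hfs : ∀ f ∈ fs, 0 < f) (arr : List Int) (hlen : (arr.length : Int) = leaves)
    (j : Nat) (hj : j < arr.length) :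
    (fs.foldl (fun a i => pvMark leaves i (leaves.toNat + 1) 1 a) arr).getD j 0 =
      if (∃ f ∈ fs, f ∣ ((j : Int) + 1)) ∧ arr.getD j 0 = 0 then 1 else arr.getD j 0 := by
  induction fs generalizing arr with
  | nil => simp
  | cons i fs ih =>
    simp only [List.foldl_cons]
    have hi : 1 ≤ i := hfs i (by simp)
    have hfuel : leaves < ((1 : Int) + (leaves.toNat + 1 : Nat)) * i := by
      push_cast
      have h1 : (leaves.toNat : Int) = leaves := by omega
      nlinarith [h1]
    have hmark := pvMark_get leaves i hi (leaves.toNat + 1) 1 le_rfl hfuel arr hlen j hj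
    have hsimp : (pvMark leaves i (leaves.toNat + 1) 1 arr).getD j 0 =
        if i ∣ ((j : Int) + 1) ∧ arr.getD j 0 = 0 then 1 else arr.getD j 0 := by
      have hiff : (i ∣ ((j : Int) + 1) ∧ 1 * i ≤ (j : Int) + 1) ∧ arr.getD j 0 = 0 ↔
          i ∣ ((j : Int) + 1) ∧ arr.getD j 0 = 0 := by
        constructor
        · rintro ⟨⟨hd, _⟩, h0⟩; exact ⟨hd, h0⟩
        · rintro ⟨hd, h0⟩
          exact ⟨⟨hd, by rw [one_mul]; exact Int.le_of_dvd (by omega) hd⟩, h0⟩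
      rw [hmark, if_congr hiff rfl rfl]
    rw [ih (fun f hf => hfs f (by simp [hf])) _
          (by rw [pvMark_length]; exact hlen) (by rw [pvMark_length]; exact hj), hsimp]
    have hcons : ∀ P : Prop, ((∃ f ∈ i :: fs, f ∣ ((j : Int) + 1)) ∧ P) ↔
        ((i ∣ ((j : Int) + 1) ∨ ∃ f ∈ fs, f ∣ ((j : Int) + 1)) ∧ P) := by
      intro P; constructor
      · rintro ⟨⟨f, hf, hfd⟩, hP⟩
        rcases List.mem_cons.mp hf with rfl | hf'
        · exact ⟨Or.inl hfd, hP⟩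
        · exact ⟨Or.inr ⟨f, hf', hfd⟩, hP⟩
      · rintro ⟨hd | ⟨f, hf, hfd⟩, hP⟩
        · exact ⟨⟨i, by simp, hd⟩, hP⟩
        · exact ⟨⟨f, by simp [hf], hfd⟩, hP⟩
    rw [if_congr (hcons _) rfl rfl]
    generalize arr.getD j 0 = v
    by_cases hd : i ∣ ((j : Int) + 1) <;> by_cases h0 : v = 0 <;>
      by_cases hex : ∃ f ∈ fs, f ∣ ((j : Int) + 1) <;>
      simp [hd, h0, hex]

theorem pvMain (N leaves : Int) (frogs : List Int) (hpre : Pre_unvisitedLeaves N leaves frogs) :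
    unvisitedLeaves N leaves frogs = unvisitedLeaves_alt N leaves frogs := by
  simp only [unvisitedLeaves, unvisitedLeaves_alt]
  unfold Pre_unvisitedLeaves at hpre
  by_cases hge : 0 ≤ leaves
  · rw [if_pos hge] at hpre
    set fs := PySem.List.sorted (PySem.Set.ofList frogs) (fun x => x) false with hfsdef
    have hmemfs : ∀ f, f ∈ fs ↔ f ∈ frogs := by
      intro f
      rw [hfsdef, PySem.List.mem_sorted, PySem.Set.mem_ofList]
    have hfs : ∀ f ∈ fs, 0 < f := fun f hf => hpre f ((hmemfs f).mp hf)
    set L := leaves.toNat with hLdef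
    have hLl : (L : Int) = leaves := by omega
    set arrF := fs.foldl (fun arr i => pvMark leaves i (L + 1) 1 arr)
      (List.replicate L (0 : Int)) with harrF
    have hlenF : arrF.length = L := by
      rw [harrF, pvMark_fold_length]; simp
    have hptF : ∀ j : Nat, j < L →
        arrF.getD j 0 = if ∃ f ∈ fs, f ∣ ((j : Int) + 1) then 1 else 0 := by
      intro j hj
      rw [harrF, pvMark_fold_get leaves hge fs hfs _ (by simp [hLl]) j (by simp [hj])]
      simp
    have harrFeq : arrF = (List.range L).map
        (fun (j : Nat) => if ∃ f ∈ fs, f ∣ ((j : Int) + 1) then (1 : Int) else 0) := by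
      apply List.ext_getElem (by simp [hlenF])
      intro j h1 h2
      have h3 := hptF j (by omega)
      rw [List.getD_eq_getElem _ _ h1] at h3
      rw [h3]
      simp
    rw [PySem.List.foldl_ite_add_one (fun x => x = 0) arrF 0, harrFeq, List.countP_map]
    rw [PySem.List.pyRange_one, ← List.countP_eq_length_filter, List.countP_map]
    have hbnd : (leaves + 1 - 1).toNat = L := by omega
    rw [hbnd]
    have hpt : ∀ k ∈ List.range L,
        ((fun x => decide (x = 0)) ∘
          (fun j : Nat => if ∃ f ∈ fs, f ∣ ((j : Int) + 1) then (1 : Int) else 0)) k =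
        ((fun p => frogs.all (fun f => decide (PySem.Int.mod p f ≠ 0))) ∘
          (fun k : Nat => (1 : Int) + k)) k := by
      intro k _
      simp only [Function.comp_apply]
      by_cases hex : ∃ f ∈ fs, f ∣ ((k : Int) + 1)
      · rw [if_pos hex]
        obtain ⟨f, hf, hfd⟩ := hex
        have hall : frogs.all (fun f => decide (PySem.Int.mod (1 + (k : Int)) f ≠ 0)) = false := by
          refine List.all_eq_false.mpr ⟨f, (hmemfs f).mp hf, ?_⟩
          have hm : PySem.Int.mod (1 + (k : Int)) f = 0 :=
            (PySem.Int.mod_eq_zero_iff_dvd _ _).mpr (by rwa [add_comm])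
          simp [hm]
        rw [hall]
        decide
      · rw [if_neg hex]
        have hall : frogs.all (fun f => decide (PySem.Int.mod (1 + (k : Int)) f ≠ 0)) = true := by
          refine List.all_eq_true.mpr ?_
          intro f hf
          have hnd : ¬ f ∣ ((k : Int) + 1) := fun hdd => hex ⟨f, (hmemfs f).mpr hf, hdd⟩
          simp only [decide_eq_true_eq]
          intro hm0
          exact hnd ((PySem.Int.mod_eq_zero_iff_dvd _ _).mp (by rwa [add_comm] at hm0))
        rw [hall]
        decide
    rw [List.countP_congr (fun x hx => by rw [hpt x hx])]
    omega
  · rw [if_neg hge] at hpre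
    have hL : leaves.toNat = 0 := by omega
    rw [hL]
    have hfold : (PySem.List.sorted (PySem.Set.ofList frogs) (fun x => x) false).foldl
        (fun arr i => pvMark leaves i (0 + 1) 1 arr) (List.replicate 0 (0 : Int)) =
        List.replicate 0 (0 : Int) := by
      rw [PySem.List.foldl_congr_mem _ _ (fun acc _ => acc) _ ?_, PySem.List.foldl_ignore]
      intro acc x hx
      have hx' : x ∈ frogs := by
        rw [PySem.List.mem_sorted, PySem.Set.mem_ofList] at hx
        exact hx
      have hlt : leaves < x := hpre x hx'
      simp only [pvMark]
      rw [if_neg (by rintro ⟨h, _⟩; omega)]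
    rw [hfold, PySem.List.pyRange_one_eq_nil (by omega)]
    simp

-- ===== VERDICT (by name: the statement is the Claim_ definition above) =====
theorem unvisitedLeaves_spec : Claim_equal_unvisitedLeaves := by
  intro N leaves frogs _ hpre
  unfold Spec_unvisitedLeaves
  exact pvMain N leaves frogs hpre
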